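-- pv_equiv track=rewrite | github.com/SeineAI/SeineFish | src/helpers.py | find_changed_functions
-- ===== SOURCE A (Python) =====
-- from typing import Dict
--
-- def find_changed_functions(file_diff: str) -> Dict[str, str]:
--     """
--     Find the functions that are changed in the file diff.
--
--     Args:
--         file_diff (str): The file diff.
--
--     Returns:
--         Dict[str, str]: A dictionary of function names and their diffs.
--     """
--     changed_functions = {}
--     function_name = None
--     function_diff = ""
--     for line in file_diff.split("\n"):
--         if line.startswith("def "):
--             if function_name is not None:
--                 changed_functions[function_name] = function_diff
--             function_name = line.split("def ")[1].split("(")[0]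
--             function_diff = line + "\n"
--         elif function_name is not None:
--             function_diff += line + "\n"
--     if function_name is not None:
--         changed_functions[function_name] = function_diff
--     return changed_functions
-- ===== SOURCE B (Python) =====
-- def find_changed_functions(file_diff: str) -> dict:
--     lines = file_diff.split("\n")
--     idxs = [i for i, line in enumerate(lines) if line.startswith("def ")]
--     result = {}
--     for k, i in enumerate(idxs):
--         j = idxs[k + 1] if k + 1 < len(idxs) else len(lines)
--         seg = lines[i:j]
--         name = seg[0].split("def ")[1].split("(")[0]
--         result[name] = "".join(line + "\n" for line in seg)
--     return result
-- ===== Notes on version B (the rewrite author's own statement) =====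
-- stated objective: alternative
-- what changed: A's single-pass state machine (current function name + incrementally concatenated diff string) is replaced by an index-based decomposition: collect the positions of the 'def ' lines once, slice the line list into segments between consecutive def positions, and build each dict entry directly from its segment.
import Mathlib
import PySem

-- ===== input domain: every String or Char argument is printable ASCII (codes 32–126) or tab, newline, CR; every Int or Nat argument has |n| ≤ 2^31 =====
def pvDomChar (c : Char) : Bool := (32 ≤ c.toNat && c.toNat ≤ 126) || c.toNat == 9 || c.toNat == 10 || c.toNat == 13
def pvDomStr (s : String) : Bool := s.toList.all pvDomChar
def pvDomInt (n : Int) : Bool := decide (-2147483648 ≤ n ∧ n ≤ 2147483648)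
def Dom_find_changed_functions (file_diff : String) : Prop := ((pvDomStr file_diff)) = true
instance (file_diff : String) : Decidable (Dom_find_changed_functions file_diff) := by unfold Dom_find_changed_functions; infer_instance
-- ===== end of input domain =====

-- B replaces A's one-pass state machine (current name + growing diff string) by an index-based
-- decomposition: collect the positions of the "def " lines once, slice the line list into segments,
-- and build each dict entry from its segment (objective: alternative decomposition, same cost).

-- ===== PORT A =====
-- shared helper: the literal Python expression line.split("def ")[1].split("(")[0]
-- (both sources contain it verbatim); the [1] index is exact here because it is only
-- reached on lines that start with "def ", where the split has at least two parts.
def pvName (line : String) : String :=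
  let parts := (PySem.Str.split? line "def ").getD []
  let tail := PySem.List.pyGetD parts 1 ""
  PySem.List.pyGetD ((PySem.Str.split? tail "(").getD []) 0 ""

def pvIsDef (line : String) : Bool := PySem.Str.startswith line "def "

-- the final 'if function_name is not None: changed_functions[function_name] = function_diff'
def pvFinish (st : PySem.Dict String String × Option String × String) : PySem.Dict String String :=
  match st.2.1 with
  | some n => st.1.insert n st.2.2
  | none => st.1

def pvLoopA : List String → PySem.Dict String String → Option String → String →
    PySem.Dict String String × Option String × String
  | [], d, name, t => (d, name, t)
  | line :: rest, d, name, t =>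
    if pvIsDef line then
      pvLoopA rest (match name with | some n => d.insert n t | none => d)
        (some (pvName line)) (line ++ "\n")
    else
      match name with
      | some _ => pvLoopA rest d name (t ++ (line ++ "\n"))
      | none => pvLoopA rest d name t

def find_changed_functions (file_diff : String) : List (String × String) :=
  (pvFinish (pvLoopA ((PySem.Str.split? file_diff "\n").getD []) PySem.Dict.empty none "")).items

-- ===== PORT B =====
def find_changed_functions_alt (file_diff : String) : List (String × String) :=
  let lines := (PySem.Str.split? file_diff "\n").getD []
  let idxs := ((PySem.List.enumerate lines).filter (fun p => pvIsDef p.2)).map (·.1)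
  let result := (PySem.List.enumerate idxs).foldl (fun d p =>
      let j := if p.1 + 1 < PySem.List.len idxs then PySem.List.pyGetD idxs (p.1 + 1) 0
               else PySem.List.len lines
      let seg := PySem.List.slice lines (some p.2) (some j)
      let name := pvName (PySem.List.pyGetD seg 0 "")
      d.insert name (PySem.Str.join "" (seg.map (fun line => line ++ "\n"))))
    PySem.Dict.empty
  result.items

-- ===== PRECONDITION & SPEC =====
def Spec_find_changed_functions (file_diff : String) (out : List (String × String)) : Prop := out = find_changed_functions_alt file_diff
instance (file_diff : String) (out : List (String × String)) : Decidable (Spec_find_changed_functions file_diff out) := by unfold Spec_find_changed_functions; infer_instance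

-- ===== CLAIM (what is proved, stated in full; the proofs are below) =====
def Claim_equal_find_changed_functions : Prop := ∀ (file_diff : String), Dom_find_changed_functions file_diff → Spec_find_changed_functions file_diff (find_changed_functions file_diff)

-- ===== LEMMAS AND PROOFS =====

-- the text of a segment: every line with a newline appended
def pvJoin (seg : List String) : String := PySem.Str.join "" (seg.map (fun l => l ++ "\n"))

-- the (name, text) entries, one per maximal block starting at a "def " line
def pvEntries : List String → List (String × String)
  | [] => []
  | l :: ls =>
    if pvIsDef l then
      (pvName l, pvJoin (l :: ls.takeWhile (fun x => !pvIsDef x))) ::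
        pvEntries (ls.dropWhile (fun x => !pvIsDef x))
    else pvEntries ls
termination_by ls => ls.length
decreasing_by
  · exact Nat.lt_succ_of_le (List.length_dropWhile_le _ _)
  · simp

def pvIns (d : PySem.Dict String String) (p : String × String) : PySem.Dict String String :=
  d.insert p.1 p.2

-- positions of the "def " lines, as naturals, defined structurally
def pvNatIdxs : List String → List Nat
  | [] => []
  | l :: ls => (if pvIsDef l then [0] else []) ++ (pvNatIdxs ls).map (· + 1)

-- pair every index with the next one (or n at the end)
def pvZipNext {α : Type} : List α → α → List (α × α)
  | [], _ => []
  | i :: rest, n => (i, rest.headD n) :: pvZipNext rest n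

-- the entry B builds from the segment lines[i:j], in Int-index form and Nat-index form
def pvEntryI (lines : List String) (a b : Int) : String × String :=
  let seg := PySem.List.slice lines (some a) (some b)
  (pvName (PySem.List.pyGetD seg 0 ""), pvJoin seg)

def pvEntryN (lines : List String) (i j : Nat) : String × String :=
  let seg := (lines.drop i).take (j - i)
  (pvName (seg.getD 0 ""), pvJoin seg)

lemma pvStrJoin_cons (a : String) (l : List String) :
    PySem.Str.join "" (a :: l) = a ++ PySem.Str.join "" l := by
  cases l with
  | nil => simp [PySem.Str.join, PySem.Chars.join, List.intercalate]
  | cons b bs =>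
    simp only [PySem.Str.join, List.map_cons]
    rw [PySem.Chars.join_cons_cons]
    simp [String.ofList_append]

lemma pvJoin_nil : pvJoin [] = "" := rfl

lemma pvJoin_cons (x : String) (xs : List String) :
    pvJoin (x :: xs) = (x ++ "\n") ++ pvJoin xs := by
  simp [pvJoin, pvStrJoin_cons]

lemma pvEntries_cons_def (l : String) (ls : List String) (h : pvIsDef l = true) :
    pvEntries (l :: ls)
      = (pvName l, pvJoin (l :: ls.takeWhile (fun x => !pvIsDef x))) ::
          pvEntries (ls.dropWhile (fun x => !pvIsDef x)) := by
  rw [pvEntries]; simp [h]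

lemma pvEntries_cons_not (l : String) (ls : List String) (h : ¬ pvIsDef l = true) :
    pvEntries (l :: ls) = pvEntries ls := by
  rw [pvEntries]; simp [h]

lemma pvLoopA_some (ls : List String) : ∀ d n t,
    pvFinish (pvLoopA ls d (some n) t)
      = List.foldl pvIns d
          ((n, t ++ pvJoin (ls.takeWhile (fun x => !pvIsDef x))) ::
            pvEntries (ls.dropWhile (fun x => !pvIsDef x))) := by
  induction ls with
  | nil =>
    intro d n t
    simp [pvLoopA, pvFinish, pvIns, pvJoin_nil, pvEntries]
  | cons l ls ih =>
    intro d n t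
    by_cases h : pvIsDef l = true
    · rw [show pvLoopA (l :: ls) d (some n) t
          = pvLoopA ls (d.insert n t) (some (pvName l)) (l ++ "\n") by simp [pvLoopA, h]]
      rw [ih]
      simp [List.dropWhile_cons, h, pvEntries_cons_def l ls h,
        pvJoin_nil, pvJoin_cons, pvIns]
    · rw [show pvLoopA (l :: ls) d (some n) t
          = pvLoopA ls d (some n) (t ++ (l ++ "\n")) by simp [pvLoopA, h]]
      rw [ih]
      simp [List.takeWhile_cons, h, pvJoin_cons, String.append_assoc]

lemma pvLoopA_none (ls : List String) : ∀ d,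
    pvFinish (pvLoopA ls d none "") = List.foldl pvIns d (pvEntries ls) := by
  induction ls with
  | nil => intro d; simp [pvLoopA, pvFinish, pvEntries]
  | cons l ls ih =>
    intro d
    by_cases h : pvIsDef l = true
    · rw [show pvLoopA (l :: ls) d none ""
          = pvLoopA ls d (some (pvName l)) (l ++ "\n") by simp [pvLoopA, h]]
      rw [pvLoopA_some, pvEntries_cons_def l ls h]
      simp [pvJoin_cons, pvIns]
    · rw [show pvLoopA (l :: ls) d none "" = pvLoopA ls d none "" by simp [pvLoopA, h]]
      rw [ih, pvEntries_cons_not l ls h]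

lemma pvEntries_dropWhile (ls : List String) :
    pvEntries (ls.dropWhile (fun x => !pvIsDef x)) = pvEntries ls := by
  induction ls with
  | nil => rfl
  | cons l ls ih =>
    by_cases h : pvIsDef l = true
    · simp [h]
    · simp [h, ih, pvEntries_cons_not l ls h]

lemma pvZipNext_map {α β : Type} (f : α → β) (I : List α) (n : α) :
    pvZipNext (I.map f) (f n) = (pvZipNext I n).map (Prod.map f f) := by
  induction I with
  | nil => rfl
  | cons i rest ih =>
    simp only [List.map_cons, pvZipNext, ih, List.map_cons, Prod.map]
    cases rest <;> simp

lemma pvHeadD_map_succ (I : List Nat) (m : Nat) :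
    (I.map (· + 1)).headD (m + 1) = I.headD m + 1 := by
  cases I <;> simp

lemma pvTake_natIdxs (ls : List String) :
    ls.take ((pvNatIdxs ls).headD ls.length) = ls.takeWhile (fun x => !pvIsDef x) := by
  induction ls with
  | nil => simp
  | cons l ls ih =>
    by_cases h : pvIsDef l = true
    · simp [pvNatIdxs, h]
    · rw [show pvNatIdxs (l :: ls) = (pvNatIdxs ls).map (· + 1) from by simp [pvNatIdxs, h]]
      rw [show (l :: ls).length = ls.length + 1 from rfl, pvHeadD_map_succ,
        List.take_succ_cons, List.takeWhile_cons_of_pos (by simp [h]), ih]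

lemma pvEnumerate_succ {α : Type} (xs : List α) : ∀ s : Int,
    PySem.List.enumerate xs (s + 1) = (PySem.List.enumerate xs s).map (fun p => (p.1 + 1, p.2)) := by
  induction xs with
  | nil => intro s; simp [PySem.List.enumerate]
  | cons x xs ih =>
    intro s
    rw [PySem.List.enumerate_cons, PySem.List.enumerate_cons, ih (s + 1)]
    simp

lemma pvCastSucc (I : List Nat) :
    ((I.map (Nat.cast : Nat → Int)).map (· + 1)) = (I.map (· + 1)).map (Nat.cast : Nat → Int) := by
  rw [List.map_map, List.map_map]
  apply List.map_congr_left
  intro k _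
  exact (Nat.cast_succ k).symm

lemma pvDefIdxs_eq (lines : List String) :
    ((PySem.List.enumerate lines).filter (fun p => pvIsDef p.2)).map (·.1)
      = (pvNatIdxs lines).map (Nat.cast : Nat → Int) := by
  induction lines with
  | nil => rfl
  | cons l ls ih =>
    rw [PySem.List.enumerate_cons, pvEnumerate_succ ls 0, List.filter_cons, List.filter_map]
    rw [show ((fun p : Int × String => pvIsDef p.2) ∘ fun p : Int × String => (p.1 + 1, p.2))
        = fun p : Int × String => pvIsDef p.2 from rfl]
    have hmm : (List.map (fun x : Int × String => x.1)
          (List.map (fun p : Int × String => (p.1 + 1, p.2))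
            ((PySem.List.enumerate ls 0).filter fun p => pvIsDef p.2)))
        = (((PySem.List.enumerate ls 0).filter fun p => pvIsDef p.2).map (fun x => x.1)).map (· + 1) := by
      rw [List.map_map, List.map_map]
      rfl
    by_cases h : pvIsDef l = true
    · rw [if_pos (by simpa using h)]
      rw [List.map_cons, hmm, ih, pvCastSucc]
      rw [show pvNatIdxs (l :: ls) = 0 :: (pvNatIdxs ls).map (· + 1) from by simp [pvNatIdxs, h]]
      rw [List.map_cons]
      norm_num
    · rw [if_neg (by simpa using h)]
      rw [hmm, ih, pvCastSucc]
      rw [show pvNatIdxs (l :: ls) = (pvNatIdxs ls).map (· + 1) from by simp [pvNatIdxs, h]]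

lemma pvE (I : List Int) (n : Int) (g : Int → Int → String × String) :
    (PySem.List.enumerate I).map (fun p =>
        g p.2 (if p.1 + 1 < PySem.List.len I then PySem.List.pyGetD I (p.1 + 1) 0 else n))
      = (pvZipNext I n).map (fun q => g q.1 q.2) := by
  induction I with
  | nil => rfl
  | cons i rest ih =>
    rw [PySem.List.enumerate_cons, pvEnumerate_succ rest 0, List.map_cons, List.map_map]
    have htail : (PySem.List.enumerate rest 0).map
          ((fun p : Int × Int =>
              g p.2 (if p.1 + 1 < PySem.List.len (i :: rest)
                then PySem.List.pyGetD (i :: rest) (p.1 + 1) 0 else n))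
            ∘ fun p : Int × Int => (p.1 + 1, p.2))
        = (PySem.List.enumerate rest 0).map (fun p =>
            g p.2 (if p.1 + 1 < PySem.List.len rest then PySem.List.pyGetD rest (p.1 + 1) 0 else n)) := by
      apply List.map_congr_left
      intro p hp
      rcases (PySem.List.mem_enumerate_iff rest 0 p).mp hp with ⟨k, hk, rfl⟩
      simp only [Function.comp, PySem.List.len_eq, List.length_cons, Nat.cast_add, Nat.cast_one]
      congr 1
      by_cases hb : (0 : Int) + (k : Int) + 1 < (rest.length : Int)
      · rw [if_pos (by omega), if_pos hb]
        rw [show (0 : Int) + (k : Int) + 1 + 1 = ((k + 1 + 1 : Nat) : Int) from by push_cast; ring,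
          show (0 : Int) + (k : Int) + 1 = ((k + 1 : Nat) : Int) from by push_cast; ring]
        rw [PySem.List.pyGetD_natCast, PySem.List.pyGetD_natCast, List.getD_cons_succ]
      · rw [if_neg (by omega), if_neg hb]
    rw [htail, ih]
    rw [show pvZipNext (i :: rest) n = (i, rest.headD n) :: pvZipNext rest n from rfl, List.map_cons]
    congr 1
    show g i (if (0 : Int) + 1 < PySem.List.len (i :: rest)
        then PySem.List.pyGetD (i :: rest) ((0 : Int) + 1) 0 else n) = g i (rest.headD n)
    cases rest with
    | nil =>
      rw [if_neg (by simp [PySem.List.len_eq])]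
      rfl
    | cons y ys =>
      rw [if_pos (by simp only [PySem.List.len_eq, List.length_cons]; push_cast; omega)]
      rw [show (0 : Int) + 1 = ((0 + 1 : Nat) : Int) from by norm_num]
      rw [PySem.List.pyGetD_natCast, List.getD_cons_succ, List.getD_cons_zero]
      rfl

lemma pvEntry_cast (lines : List String) (i j : Nat) :
    pvEntryI lines (i : Int) (j : Int) = pvEntryN lines i j := by
  simp [pvEntryI, pvEntryN, PySem.List.slice_natCast, PySem.List.pyGetD_zero]

lemma pvEntryN_shift (l : String) (ls : List String) (i j : Nat) :
    pvEntryN (l :: ls) (i + 1) (j + 1) = pvEntryN ls i j := by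
  simp [pvEntryN, List.drop_succ_cons, Nat.succ_sub_succ]

set_option maxHeartbeats 1000000 in
lemma pvM (lines : List String) :
    (pvZipNext (pvNatIdxs lines) lines.length).map (fun q => pvEntryN lines q.1 q.2)
      = pvEntries lines := by
  induction lines with
  | nil => simp [pvZipNext, pvNatIdxs, pvEntries]
  | cons l ls ih =>
    have hshift : (pvZipNext ((pvNatIdxs ls).map (· + 1)) (ls.length + 1)).map
          (fun q => pvEntryN (l :: ls) q.1 q.2)
        = pvEntries ls := by
      rw [show ls.length + 1 = (fun x => x + 1) ls.length from rfl,
        pvZipNext_map (fun x => x + 1) (pvNatIdxs ls) ls.length]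
      rw [List.map_map]
      rw [show ((fun q : Nat × Nat => pvEntryN (l :: ls) q.1 q.2) ∘
            Prod.map (fun x => x + 1) (fun x => x + 1))
          = fun q : Nat × Nat => pvEntryN ls q.1 q.2 from
            funext (fun q => pvEntryN_shift l ls q.1 q.2)]
      exact ih
    by_cases h : pvIsDef l = true
    · have hhead : pvEntryN (l :: ls) 0 (((pvNatIdxs ls).map (· + 1)).headD (ls.length + 1))
          = (pvName l, pvJoin (l :: ls.takeWhile (fun x => !pvIsDef x))) := by
        rw [pvHeadD_map_succ]
        simp only [pvEntryN, List.drop_zero, Nat.sub_zero, List.take_succ_cons, pvTake_natIdxs,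
          List.getD_cons_zero]
      rw [pvEntries_cons_def l ls h]
      rw [show pvNatIdxs (l :: ls) = 0 :: (pvNatIdxs ls).map (· + 1) from by simp [pvNatIdxs, h]]
      rw [show (l :: ls).length = ls.length + 1 from rfl]
      rw [show pvZipNext (0 :: (pvNatIdxs ls).map (· + 1)) (ls.length + 1)
          = (0, ((pvNatIdxs ls).map (· + 1)).headD (ls.length + 1)) ::
              pvZipNext ((pvNatIdxs ls).map (· + 1)) (ls.length + 1) from rfl]
      rw [List.map_cons, hshift, pvEntries_dropWhile, hhead]
    · rw [pvEntries_cons_not l ls h]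
      rw [show pvNatIdxs (l :: ls) = (pvNatIdxs ls).map (· + 1) from by simp [pvNatIdxs, h]]
      rw [show (l :: ls).length = ls.length + 1 from rfl]
      exact hshift

set_option maxHeartbeats 1000000 in
lemma pvStep1 (lines : List String) (idxs : List Int) :
    (PySem.List.enumerate idxs).foldl (fun d p =>
        let j := if p.1 + 1 < PySem.List.len idxs then PySem.List.pyGetD idxs (p.1 + 1) 0
                 else PySem.List.len lines
        let seg := PySem.List.slice lines (some p.2) (some j)
        let name := pvName (PySem.List.pyGetD seg 0 "")
        d.insert name (PySem.Str.join "" (seg.map (fun line => line ++ "\n"))))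
      PySem.Dict.empty
      = List.foldl pvIns PySem.Dict.empty ((PySem.List.enumerate idxs).map (fun p =>
          pvEntryI lines p.2 (if p.1 + 1 < PySem.List.len idxs then PySem.List.pyGetD idxs (p.1 + 1) 0
            else PySem.List.len lines))) := by
  rw [List.foldl_map]
  apply PySem.List.foldl_congr_mem
  intro acc p _
  simp only [pvIns, pvEntryI, pvJoin]

lemma pvA_eq (fd : String) :
    find_changed_functions fd
      = (List.foldl pvIns PySem.Dict.empty (pvEntries ((PySem.Str.split? fd "\n").getD []))).items := by
  unfold find_changed_functions
  rw [pvLoopA_none]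

set_option maxHeartbeats 1000000 in
lemma pvB_eq (fd : String) :
    find_changed_functions_alt fd
      = (List.foldl pvIns PySem.Dict.empty (pvEntries ((PySem.Str.split? fd "\n").getD []))).items := by
  simp only [find_changed_functions_alt]
  rw [pvStep1]
  rw [pvE (((PySem.List.enumerate ((PySem.Str.split? fd "\n").getD [])).filter
        (fun p => pvIsDef p.2)).map (·.1))
      (PySem.List.len ((PySem.Str.split? fd "\n").getD []))
      (pvEntryI ((PySem.Str.split? fd "\n").getD []))]
  rw [pvDefIdxs_eq]
  rw [PySem.List.len_eq]
  rw [pvZipNext_map (Nat.cast : Nat → Int)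
      (pvNatIdxs ((PySem.Str.split? fd "\n").getD []))
      ((PySem.Str.split? fd "\n").getD []).length]
  rw [List.map_map]
  rw [show ((fun q : Int × Int => pvEntryI ((PySem.Str.split? fd "\n").getD []) q.1 q.2) ∘
        Prod.map (Nat.cast : Nat → Int) (Nat.cast : Nat → Int))
      = (fun q : Nat × Nat => pvEntryN ((PySem.Str.split? fd "\n").getD []) q.1 q.2) from
        funext fun q => pvEntry_cast ((PySem.Str.split? fd "\n").getD []) q.1 q.2]
  rw [pvM]

-- ===== VERDICT (by name: the statement is the Claim_ definition above) =====
theorem find_changed_functions_spec : Claim_equal_find_changed_functions := by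
  intro file_diff _
  unfold Spec_find_changed_functions
  rw [pvA_eq, pvB_eq]
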